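-- pv_equiv track=rewrite | github.com/bcvalley/LoLGameAssistant | match_history.py | getSOm
-- ===== SOURCE A (Python) =====
-- from collections import Counter
--
-- def getSOm(all_games: list):
--     all_played_champions = []
--     sorted_by_most_common = []
--
--     # Collect all played champions
--     for game in all_games:
--         all_played_champions.append(game[0])
--
--     # Count occurrences of each champion
--     counter = Counter(all_played_champions)
--
--     # Sort by most common champion
--     sorted_champions = counter.most_common()
--
--     # Create sorted list by iterating through sorted champions list
--     for champ, count in sorted_champions:
--         for game in all_games:
--             if game[0] == champ:
--                 sorted_by_most_common.append(game)
--
--     return sorted_by_most_common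
-- ===== SOURCE B (Python) =====
-- def getSOm(all_games: list):
--     # Group games by champion in first-encounter order, then flatten groups
--     # sorted by descending size (stable sort keeps most_common's tie order).
--     groups = {}
--     for game in all_games:
--         groups[game[0]] = groups.get(game[0], []) + [game]
--     ordered = sorted(groups.items(), key=lambda kv: -len(kv[1]))
--     return [g for _, grp in ordered for g in grp]
-- ===== Notes on version B (the rewrite author's own statement) =====
-- stated objective: simpler
-- what changed: Replaces Counter plus a full rescan of all_games per distinct champion with a single group-by pass building champion->games lists, then one stable sort of the groups by descending size and a flatten.
-- outside the precondition, e.g. on getSOm([[]]): A raises IndexError, B raises IndexError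
import Mathlib
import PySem

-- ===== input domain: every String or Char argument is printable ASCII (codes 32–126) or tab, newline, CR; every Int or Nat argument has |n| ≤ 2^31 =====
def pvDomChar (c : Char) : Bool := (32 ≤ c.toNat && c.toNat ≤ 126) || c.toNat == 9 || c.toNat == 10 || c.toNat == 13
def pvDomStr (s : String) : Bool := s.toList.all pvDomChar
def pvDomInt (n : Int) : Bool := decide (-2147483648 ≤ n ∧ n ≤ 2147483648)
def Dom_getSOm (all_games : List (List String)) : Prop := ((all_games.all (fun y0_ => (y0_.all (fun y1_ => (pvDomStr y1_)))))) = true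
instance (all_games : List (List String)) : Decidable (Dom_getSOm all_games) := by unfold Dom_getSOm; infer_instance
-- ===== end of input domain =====

-- B replaces A's count-then-rescan-per-champion with a single group-by pass plus
-- one stable sort of the groups by descending size (objective: simpler).

-- ===== PORT A =====
-- game[0] is ported as pyGetD game 0 "" — exact under Pre_ (every game nonempty)
def getSOm (all_games : List (List String)) : List (List String) :=
  let all_played_champions :=
    all_games.foldl (fun acc game => acc ++ [PySem.List.pyGetD game 0 ""]) []
  let counter := PySem.Dict.counter all_played_champions
  -- counter.most_common() = items sorted by count, descending, stable
  let sorted_champions := PySem.List.sorted counter.items (fun kv => kv.2) true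
  sorted_champions.foldl (fun acc cv =>
    all_games.foldl (fun acc game =>
      if PySem.List.pyGetD game 0 "" == cv.1 then acc ++ [game] else acc) acc) []

-- ===== PORT B =====
-- groups[game[0]] = groups.get(game[0], []) + [game]  is Dict.modify
def getSOm_alt (all_games : List (List String)) : List (List String) :=
  let groups := all_games.foldl
    (fun d game => d.modify (PySem.List.pyGetD game 0 "") [] (fun v => v ++ [game]))
    PySem.Dict.empty
  let ordered := PySem.List.sorted groups.items (fun kv => -((kv.2.length : Int))) false
  ordered.flatMap (fun kv => kv.2)

-- ===== PRECONDITION & SPEC =====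
-- Pre_ excludes exactly the inputs where Python A raises IndexError: a game with no entries (game[0]).
def Pre_getSOm (all_games : List (List String)) : Prop := ∀ g ∈ all_games, g ≠ []
instance (all_games : List (List String)) : Decidable (Pre_getSOm all_games) := by
  unfold Pre_getSOm; infer_instance
def pvWitness_getSOm : List (List String) :=
  [["Ahri", "W"], ["Lux", "L"], ["Ahri", "L"], ["Zed", "W"], ["Lux", "W"]]
def Spec_getSOm (all_games : List (List String)) (out : List (List String)) : Prop := out = getSOm_alt all_games
instance (all_games : List (List String)) (out : List (List String)) : Decidable (Spec_getSOm all_games out) := by unfold Spec_getSOm; infer_instance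

-- ===== CLAIM (what is proved, stated in full; the proofs are below) =====
def Claim_equal_getSOm : Prop := ∀ (all_games : List (List String)), Dom_getSOm all_games → Pre_getSOm all_games → Spec_getSOm all_games (getSOm all_games)

-- ===== LEMMAS AND PROOFS =====

-- insertBy commutes with map when the predicate factors through f
theorem insertBy_map {α β : Type} (f : α → β) (p : β → β → Bool) (x : α) (ys : List α) :
    PySem.List.insertBy p (f x) (ys.map f)
      = (PySem.List.insertBy (fun a b => p (f a) (f b)) x ys).map f := by
  induction ys with
  | nil => simp [PySem.List.insertBy]
  | cons y ys ih =>
    simp only [List.map_cons, PySem.List.insertBy]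
    by_cases h : p (f x) (f y)
    · simp [h]
    · simp [h, ih]

theorem foldl_insertBy_map {α β : Type} (f : α → β) (p : β → β → Bool) (xs acc : List α) :
    List.foldl (fun acc x => PySem.List.insertBy p x acc) (acc.map f) (xs.map f)
      = (List.foldl (fun acc x => PySem.List.insertBy (fun a b => p (f a) (f b)) x acc) acc xs).map f := by
  induction xs generalizing acc with
  | nil => simp
  | cons x xs ih =>
    simp only [List.map_cons, List.foldl_cons]
    rw [insertBy_map, ih]

theorem sorted_map_false {α β κ : Type} [LinearOrder κ] (f : α → β) (key : β → κ) (xs : List α) :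
    PySem.List.sorted (xs.map f) key false
      = (PySem.List.sorted xs (fun x => key (f x)) false).map f := by
  rw [PySem.List.sorted_eq_foldl_insertBy, PySem.List.sorted_eq_foldl_insertBy]
  simpa using foldl_insertBy_map f (fun a b => decide (key a < key b)) xs []

theorem sorted_map_true {α β κ : Type} [LinearOrder κ] (f : α → β) (key : β → κ) (xs : List α) :
    PySem.List.sorted (xs.map f) key true
      = (PySem.List.sorted xs (fun x => key (f x)) true).map f := by
  rw [PySem.List.sorted_rev_eq_foldl_insertBy, PySem.List.sorted_rev_eq_foldl_insertBy]
  simpa using foldl_insertBy_map f (fun a b => decide (key b < key a)) xs []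

-- Python's stable descending sort on key k is the stable ascending sort on -k
theorem sorted_rev_eq_sorted_neg {α : Type} (k : α → Int) (xs : List α) :
    PySem.List.sorted xs k true = PySem.List.sorted xs (fun x => -(k x)) false := by
  rw [PySem.List.sorted_rev_eq_foldl_insertBy, PySem.List.sorted_eq_foldl_insertBy]
  have h : (fun (a b : α) => decide (k b < k a)) = (fun a b => decide (-(k a) < -(k b))) := by
    funext a b; simp
  rw [h]

theorem getSOm_eq (all_games : List (List String)) : getSOm all_games = getSOm_alt all_games := by
  unfold getSOm getSOm_alt
  simp only [PySem.List.foldl_append_singleton_eq_map, List.nil_append]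
  -- abbreviations
  set hd : List String → String := fun g => PySem.List.pyGetD g 0 "" with hhd
  -- A side: counter items, then flatten of filters over the sorted champion list
  rw [PySem.Dict.items_counter]
  rw [sorted_map_true (fun k => (k, (List.count k (all_games.map hd) : Int))) (fun kv => kv.2)]
  -- the nested loops are a flatMap of filters
  have hA : ∀ (L : List String),
      List.foldl (fun acc cv =>
        List.foldl (fun acc game =>
          if PySem.List.pyGetD game 0 "" == cv.1 then acc ++ [game] else acc) acc all_games) []
        (L.map (fun k => (k, (List.count k (all_games.map hd) : Int))))
      = L.flatMap (fun c => all_games.filter (fun g => hd g == c)) := by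
    intro L
    have hinner : ∀ (acc : List (List String)) (c : String),
        List.foldl (fun acc game =>
          if PySem.List.pyGetD game 0 "" == c then acc ++ [game] else acc) acc all_games
        = acc ++ all_games.filter (fun g => hd g == c) := by
      intro acc c
      simpa using PySem.List.foldl_append_if (fun g => PySem.List.pyGetD g 0 "" == c) id all_games acc
    calc List.foldl _ [] (L.map (fun k => (k, (List.count k (all_games.map hd) : Int))))
        = List.foldl (fun acc c => acc ++ all_games.filter (fun g => hd g == c)) [] L := by
          rw [List.foldl_map]; congr 1; funext acc c; exact hinner acc c
      _ = L.flatMap (fun c => all_games.filter (fun g => hd g == c)) := by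
          simpa using PySem.List.foldl_append_eq_flatMap (fun c => all_games.filter (fun g => hd g == c)) L []
  rw [hA]
  -- B side: the group-by dict's items are the champions with their filtered game lists
  have hfold : all_games.foldl
      (fun d game => d.modify (PySem.List.pyGetD game 0 "") [] (fun v => v ++ [game]))
      PySem.Dict.empty
    = (all_games.map (fun g => (hd g, g))).foldl
        (fun d p => d.modify p.1 [] (fun v => v ++ [p.2])) PySem.Dict.empty := by
    rw [List.foldl_map]
  rw [hfold]
  set groups := (all_games.map (fun g => (hd g, g))).foldl
      (fun d p => d.modify p.1 [] (fun v => v ++ [p.2])) PySem.Dict.empty with hgroups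
  have hkeys : groups.keys = PySem.Set.ofList (all_games.map hd) := by
    rw [hgroups, PySem.Dict.keys_foldl_modify_key _ Prod.fst [] (fun _ p => fun v => v ++ [p.2])]
    simp [PySem.Dict.keys_empty]
    rfl
  have hnodup : groups.keys.Nodup := by
    rw [hgroups]
    exact PySem.Dict.nodup_keys_foldl_modify_key _ Prod.fst [] (fun _ p => fun v => v ++ [p.2]) _
      (by simp)
  have hgetD : ∀ c, groups.getD c [] = all_games.filter (fun g => hd g == c) := by
    intro c
    rw [hgroups, PySem.Dict.getD_foldl_modify_append]
    simp [List.filter_map, Function.comp_def]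
  have hitems : groups.items
      = (PySem.Set.ofList (all_games.map hd)).map
          (fun c => (c, all_games.filter (fun g => hd g == c))) := by
    rw [PySem.Dict.items_eq_map_keys groups hnodup [], hkeys]
    exact List.map_congr_left (fun c _ => by rw [hgetD c])
  rw [hitems]
  rw [sorted_map_false (fun c => (c, all_games.filter (fun g => hd g == c)))
        (fun kv => -((kv.2.length : Int)))]
  rw [List.flatMap_map]
  -- the two sorted champion lists agree: count = length of the filter, desc = asc on the negation
  have hcount : ∀ c : String, (List.count c (all_games.map hd) : Int)
      = ((all_games.filter (fun g => hd g == c)).length : Int) := by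
    intro c
    congr 1
    rw [List.count_eq_countP, List.countP_map, List.countP_eq_length_filter]
    rfl
  rw [sorted_rev_eq_sorted_neg]
  have hk : (fun x : String => -((x, (List.count x (all_games.map hd) : Int)).2))
      = (fun x : String => -(((x, all_games.filter (fun g => hd g == x)).2.length : Int))) := by
    funext c
    exact congrArg Neg.neg (hcount c)
  rw [hk]

-- ===== VERDICT (by name: the statement is the Claim_ definition above) =====
theorem getSOm_spec : Claim_equal_getSOm := by
  intro all_games _ _
  unfold Spec_getSOm
  exact getSOm_eq all_games
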